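-- pv_equiv track=rewrite | github.com/cirosantilli/project-euler-solvers | solvers/172.py | search
-- ===== SOURCE A (Python) =====
-- def search(
--     counts: list[int], digits: int, max_digits: int, max_use: int, cache: dict
-- ) -> int:
--     if digits == max_digits:
--         return 1
--
--     key = tuple(counts)
--     if key in cache:
--         return cache[key]
--
--     result = 0
--     if digits > 0 and counts[0] < max_use:
--         counts[0] += 1
--         result += search(counts, digits + 1, max_digits, max_use, cache)
--         counts[0] -= 1
--
--     for digit in range(1, 10):
--         if counts[digit] < max_use:
--             counts[digit] += 1
--             result += search(counts, digits + 1, max_digits, max_use, cache)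
--             counts[digit] -= 1
--
--     cache[key] = result
--     return result
-- ===== SOURCE B (Python) =====
-- def search(
--     counts: list[int], digits: int, max_digits: int, max_use: int, cache: dict
-- ) -> int:
--     # NOTE: unlike A, this implementation reads `cache` but never writes to it
--     # and never touches `counts`; the agreement claimed is about return values.
--     if digits == max_digits:
--         return 1
--     start = tuple(counts)
--     if start in cache:
--         return cache[start]
--
--     def moves(c, d):
--         # states reachable by appending one more digit to a state at depth d
--         out = []
--         for dig in range(10):
--             if (dig > 0 or d > 0) and c[dig] < max_use:
--                 out.append(c[:dig] + (c[dig] + 1,) + c[dig + 1:])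
--         return out
--
--     def terminal(c, d):
--         # value of a state that needs no expansion, else None
--         if d == max_digits:
--             return 1
--         if c in cache:
--             return cache[c]
--         return None
--
--     # forward pass: breadth-first levels of distinct non-terminal states;
--     # each level consumes one unit of remaining digit capacity, which bounds
--     # the number of levels by the total remaining capacity.
--     budget = sum(max(0, max_use - counts[d]) for d in range(10))
--     levels = []
--     frontier = [start]
--     d = digits
--     for _ in range(budget + 1):
--         if not frontier:
--             break
--         levels.append((d, frontier))
--         seen = set()
--         nxt = []
--         for c in frontier:
--             for ch in moves(c, d):
--                 if terminal(ch, d + 1) is None and ch not in seen: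
--                     seen.add(ch)
--                     nxt.append(ch)
--         frontier = nxt
--         d = d + 1
--
--     # backward pass: evaluate the levels deepest-first
--     vals = {}
--     for d, states in reversed(levels):
--         for c in states:
--             total = 0
--             for ch in moves(c, d):
--                 t = terminal(ch, d + 1)
--                 total += vals[ch] if t is None else t
--             vals[c] = total
--     return vals[start]
-- ===== Notes on version B (the rewrite author's own statement) =====
-- stated objective: alternative
-- what changed: B replaces A's cache-threading memoized depth-first recursion by an explicit two-phase dynamic program: a breadth-first forward pass that builds the deduplicated levels of non-terminal digit-count states (the given cache is only read, as an oracle for already-known states), followed by a deepest-first backward pass that tabulates each state's value from its children; A's dict writes disappear and no recursion is used.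
import Mathlib
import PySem

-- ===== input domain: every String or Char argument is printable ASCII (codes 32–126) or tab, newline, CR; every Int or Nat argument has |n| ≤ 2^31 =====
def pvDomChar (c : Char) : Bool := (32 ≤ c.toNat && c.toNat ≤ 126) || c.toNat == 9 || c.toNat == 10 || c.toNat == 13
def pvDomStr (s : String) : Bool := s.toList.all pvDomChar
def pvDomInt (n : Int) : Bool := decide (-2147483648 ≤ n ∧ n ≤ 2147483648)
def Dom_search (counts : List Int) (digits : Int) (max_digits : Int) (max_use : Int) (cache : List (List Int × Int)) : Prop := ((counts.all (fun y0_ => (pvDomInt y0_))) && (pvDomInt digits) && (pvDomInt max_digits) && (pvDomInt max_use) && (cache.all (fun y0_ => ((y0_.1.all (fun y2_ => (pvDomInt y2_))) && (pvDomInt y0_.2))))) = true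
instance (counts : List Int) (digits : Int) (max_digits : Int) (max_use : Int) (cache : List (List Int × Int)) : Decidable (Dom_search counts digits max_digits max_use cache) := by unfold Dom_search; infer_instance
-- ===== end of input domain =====

-- ===== PORT A =====
-- B replaces A's memoized depth-first recursion (which writes results into the caller's cache)
-- by an iterative BFS-levels + backward-table dynamic program that only READS the cache;
-- A mutates the caller's cache dict in place, so the agreement proved is about return values only.

-- total remaining digit capacity: A's recursion consumes one unit per level
-- (termination measure for the ports; also B's level budget, as in Source B)
def pvCap (max_use : Int) (c : List Int) : Nat :=
  ((List.range 10).map (fun d => (max_use - c.getD d 0).toNat)).sum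

lemma pvCap_set_lt (max_use : Int) (c : List Int) (dig : Nat) (x : Int)
    (hdig : dig < 10) (hget : PySem.List.pyGet? c (dig : Int) = some x) (hx : x < max_use) :
    pvCap max_use (c.set dig (x + 1)) < pvCap max_use c := by
  simp [pysem] at hget
  obtain ⟨hlen, -⟩ := List.getElem?_eq_some_iff.1 hget
  have hxv : c.getD dig 0 = x := by simp [List.getD, hget]
  unfold pvCap
  apply List.sum_lt_sum
  · intro i hi
    by_cases hid : i = dig
    · subst hid
      rw [show (c.set i (x + 1)).getD i 0 = x + 1 from by
            simp [List.getD, List.getElem?_set_self hlen], hxv]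
      omega
    · rw [show (c.set dig (x + 1)).getD i 0 = c.getD i 0 from by
            have : ¬ dig = i := fun e => hid e.symm
            simp [List.getD, this]]
  · exact ⟨dig, by simp [List.mem_range]; omega,
      by rw [show (c.set dig (x + 1)).getD dig 0 = x + 1 from by
               simp [List.getD, List.getElem?_set_self hlen], hxv]
         omega⟩

mutual

def searchGo (max_digits max_use : Int) (counts : List Int) (digits : Int)
    (cache : PySem.Dict (List Int) Int) : Int × PySem.Dict (List Int) Int :=
  if digits = max_digits then (1, cache)
  else
    match cache.get? counts with
    | some v => (v, cache)
    | none =>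
      let step0 : Int × PySem.Dict (List Int) Int :=
        if 0 < digits then
          match h0 : PySem.List.pyGet? counts (0 : Int) with
          | some x =>
            if hx : x < max_use then
              searchGo max_digits max_use (counts.set 0 (x + 1)) (digits + 1) cache
            else (0, cache)
          | none => (0, cache)   -- Python raises IndexError here (outside Pre_search)
        else (0, cache)
      let lr := searchLoop max_digits max_use counts digits 1 step0.1 step0.2
      (lr.1, lr.2.insert counts lr.1)
termination_by (pvCap max_use counts, 11)
decreasing_by
  · exact Prod.Lex.left _ _ (pvCap_set_lt _ _ 0 _ (by omega) h0 hx)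
  · exact Prod.Lex.right _ (by omega)

def searchLoop (max_digits max_use : Int) (counts : List Int) (digits : Int)
    (dig : Nat) (acc : Int) (cache : PySem.Dict (List Int) Int) :
    Int × PySem.Dict (List Int) Int :=
  if _hd : dig < 10 then
    match h : PySem.List.pyGet? counts (dig : Int) with
    | some x =>
      if hx : x < max_use then
        let r := searchGo max_digits max_use (counts.set dig (x + 1)) (digits + 1) cache
        searchLoop max_digits max_use counts digits (dig + 1) (acc + r.1) r.2
      else searchLoop max_digits max_use counts digits (dig + 1) acc cache
    | none => (acc, cache)     -- Python raises IndexError here (outside Pre_search)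
  else (acc, cache)
termination_by (pvCap max_use counts, 10 - dig)
decreasing_by
  · exact Prod.Lex.left _ _ (pvCap_set_lt _ _ dig _ _hd h hx)
  · exact Prod.Lex.right _ (by omega)
  · exact Prod.Lex.right _ (by omega)

end

def search (counts : List Int) (digits : Int) (max_digits : Int) (max_use : Int)
    (cache : List (List Int × Int)) : Int :=
  (searchGo max_digits max_use counts digits (PySem.Dict.mk cache)).1

-- ===== PORT B =====

-- the non-raising successor states of a state at depth d (Source B's `moves`)
def bMoves (max_use digits : Int) (c : List Int) : List (List Int) :=
  (List.range 10).filterMap (fun (dig : Nat) =>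
    match PySem.List.pyGet? c (dig : Int) with
    | some x => if (0 < dig ∨ 0 < digits) ∧ x < max_use then some (c.set dig (x + 1)) else none
    | none => none)   -- Python raises IndexError here (outside Pre_search)

-- Source B's `terminal`
def bTerm (max_digits : Int) (cache0 : PySem.Dict (List Int) Int) (c : List Int) (d : Int) :
    Option Int :=
  if d = max_digits then some 1 else cache0.get? c

-- one forward step: deduplicated non-terminal children of a whole level
def bNext (max_digits max_use : Int) (cache0 : PySem.Dict (List Int) Int) (d : Int)
    (frontier : List (List Int)) : List (List Int) :=
  PySem.List.dedup (frontier.flatMap (fun c =>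
    (bMoves max_use d c).filter (fun ch => (bTerm max_digits cache0 ch (d + 1)).isNone)))

-- Source B's forward loop (`for _ in range(budget + 1)` with early break)
def bLevels (max_digits max_use : Int) (cache0 : PySem.Dict (List Int) Int) :
    Nat → Int → List (List Int) → List (Int × List (List Int))
  | 0, _, _ => []
  | fuel + 1, d, frontier =>
    if frontier.isEmpty then []
    else (d, frontier) ::
      bLevels max_digits max_use cache0 fuel (d + 1) (bNext max_digits max_use cache0 d frontier)

-- value of one state from its children's already-tabulated values
def bChildVal (max_digits max_use : Int) (cache0 vals : PySem.Dict (List Int) Int)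
    (d : Int) (c : List Int) : Int :=
  ((bMoves max_use d c).map (fun ch =>
      match bTerm max_digits cache0 ch (d + 1) with
      | some t => t
      | none => vals.getD ch 0)).sum

-- Source B's backward loop over `reversed(levels)`
def bEval (max_digits max_use : Int) (cache0 : PySem.Dict (List Int) Int)
    (levels : List (Int × List (List Int))) : PySem.Dict (List Int) Int :=
  levels.reverse.foldl (fun vals lev =>
    lev.2.foldl (fun vals c => vals.insert c (bChildVal max_digits max_use cache0 vals lev.1 c)) vals)
    PySem.Dict.empty

def search_alt (counts : List Int) (digits : Int) (max_digits : Int) (max_use : Int)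
    (cache : List (List Int × Int)) : Int :=
  if digits = max_digits then 1
  else
    match (PySem.Dict.mk cache).get? counts with
    | some v => v
    | none =>
      let budget := ((List.range 10).map (fun d => (max_use - counts.getD d 0).toNat)).sum
      let levels := bLevels max_digits max_use (PySem.Dict.mk cache) (budget + 1) digits [counts]
      (bEval max_digits max_use (PySem.Dict.mk cache) levels).getD counts 0

-- ===== PRECONDITION & SPEC =====
-- Pre_search excludes exactly the inputs on which the Python A raises IndexError: `counts`
-- has fewer than 10 entries and the digit-count indexing is actually reached (neither the
-- depth base case nor a cache hit short-circuits before it).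
def Pre_search (counts : List Int) (digits : Int) (max_digits : Int) (max_use : Int)
    (cache : List (List Int × Int)) : Prop :=
  digits = max_digits ∨ ((PySem.Dict.mk cache).get? counts).isSome = true ∨
    10 ≤ counts.length
instance (counts : List Int) (digits : Int) (max_digits : Int) (max_use : Int)
    (cache : List (List Int × Int)) : Decidable (Pre_search counts digits max_digits max_use cache) := by
  unfold Pre_search; infer_instance

def pvWitness_search : List Int × Int × Int × Int × (List (List Int × Int)) :=
  ([0, 0, 0, 0, 0, 0, 0, 0, 0, 0], 0, 2, 1, [])

def Spec_search (counts : List Int) (digits : Int) (max_digits : Int) (max_use : Int)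
    (cache : List (List Int × Int)) (out : Int) : Prop :=
  out = search_alt counts digits max_digits max_use cache
instance (counts : List Int) (digits : Int) (max_digits : Int) (max_use : Int)
    (cache : List (List Int × Int)) (out : Int) :
    Decidable (Spec_search counts digits max_digits max_use cache out) := by
  unfold Spec_search; infer_instance

-- ===== CLAIM (what is proved, stated in full; the proofs are below) =====
def Claim_equal_search : Prop := ∀ (counts : List Int) (digits : Int) (max_digits : Int) (max_use : Int) (cache : List (List Int × Int)), Dom_search counts digits max_digits max_use cache → Pre_search counts digits max_digits max_use cache → Spec_search counts digits max_digits max_use cache (search counts digits max_digits max_use cache)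

-- ===== LEMMAS AND PROOFS =====

-- basic list-index facts used throughout
lemma pyGetNat (c : List Int) (dig : Nat) (x : Int)
    (hget : PySem.List.pyGet? c (dig : Int) = some x) : dig < c.length ∧ c.getD dig 0 = x := by
  simp [pysem] at hget
  obtain ⟨h, -⟩ := List.getElem?_eq_some_iff.1 hget
  exact ⟨h, by simp [List.getD, hget]⟩

lemma pyGet_of_lt (c : List Int) (dig : Nat) (hlen : dig < c.length) :
    PySem.List.pyGet? c (dig : Int) = some (c.getD dig 0) := by
  simp [pysem]
  rw [List.getElem?_eq_getElem hlen]
  simp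

lemma getD_set_ne (c : List Int) (i dig : Nat) (v : Int) (h : ¬ dig = i) :
    (c.set dig v).getD i 0 = c.getD i 0 := by
  simp [List.getD, h]

lemma getD_set_self (c : List Int) (dig : Nat) (v : Int) (h : dig < c.length) :
    (c.set dig v).getD dig 0 = v := by
  simp [List.getD, List.getElem?_set_self h]

lemma sum_set_succ (c : List Int) (dig : Nat) (x : Int)
    (hlen : dig < c.length) (hxv : c.getD dig 0 = x) :
    (c.set dig (x + 1)).sum = c.sum + 1 := by
  rw [List.sum_set', dif_pos hlen]
  rw [List.getD_eq_getElem c 0 hlen] at hxv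
  omega

lemma pvCap_set_eq (max_use : Int) (c : List Int) (dig : Nat) (x : Int)
    (hdig : dig < 10) (hlen : dig < c.length) (hxv : c.getD dig 0 = x) (hx : x < max_use) :
    pvCap max_use (c.set dig (x + 1)) + 1 = pvCap max_use c := by
  unfold pvCap
  have hbr : ∀ g : Nat → Nat, ((List.range 10).map g).sum = ∑ i ∈ Finset.range 10, g i := by
    intro g
    induction (10 : Nat) with
    | zero => rfl
    | succ n ih =>
      rw [List.range_succ, Finset.sum_range_succ, List.map_append, List.sum_append, ih]; simp
  rw [hbr, hbr]
  have hmem : dig ∈ Finset.range 10 := Finset.mem_range.2 hdig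
  rw [← Finset.sum_erase_add _ _ hmem, ← Finset.sum_erase_add _ _ hmem]
  rw [Finset.sum_congr rfl (fun i hi => by
    have hne : ¬ dig = i := fun e => (Finset.mem_erase.1 hi).1 e.symm
    rw [getD_set_ne c i dig _ hne])]
  rw [getD_set_self c dig _ hlen, hxv]
  omega

-- characterisation of B's move list
lemma mem_bMoves (mu dgs : Int) (c ch : List Int) :
    ch ∈ bMoves mu dgs c ↔ ∃ dig : Nat, dig < 10 ∧ ∃ x : Int,
      PySem.List.pyGet? c (dig : Int) = some x ∧ (0 < dig ∨ 0 < dgs) ∧ x < mu ∧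
      ch = c.set dig (x + 1) := by
  unfold bMoves
  rw [List.mem_filterMap]
  constructor
  · rintro ⟨dig, hmem, hfn⟩
    have hdig : dig < 10 := List.mem_range.1 hmem
    cases hx : PySem.List.pyGet? c (dig : Int) with
    | none => rw [hx] at hfn; simp at hfn
    | some x =>
      rw [hx] at hfn
      by_cases hcond : (0 < dig ∨ 0 < dgs) ∧ x < mu
      · have hfn' : (if (0 < dig ∨ 0 < dgs) ∧ x < mu
            then some (c.set dig (x + 1)) else none) = some ch := hfn
        rw [if_pos hcond] at hfn'
        exact ⟨dig, hdig, x, hx, hcond.1, hcond.2, (Option.some.inj hfn').symm⟩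
      · have hfn' : (if (0 < dig ∨ 0 < dgs) ∧ x < mu
            then some (c.set dig (x + 1)) else none) = some ch := hfn
        rw [if_neg hcond] at hfn'; simp at hfn'
  · rintro ⟨dig, hdig, x, hget, h1, h2, rfl⟩
    refine ⟨dig, List.mem_range.2 hdig, ?_⟩
    rw [hget]
    show (if (0 < dig ∨ 0 < dgs) ∧ x < mu then some (c.set dig (x + 1)) else none) = _
    rw [if_pos ⟨h1, h2⟩]

lemma bMoves_cap (mu dgs : Int) (c ch : List Int) (h : ch ∈ bMoves mu dgs c) :
    pvCap mu ch + 1 = pvCap mu c := by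
  obtain ⟨dig, hdig, x, hget, -, hx, rfl⟩ := (mem_bMoves mu dgs c ch).1 h
  obtain ⟨hlen, hxv⟩ := pyGetNat c dig x hget
  exact pvCap_set_eq mu c dig x hdig hlen hxv hx

lemma bMoves_len (mu dgs : Int) (c ch : List Int) (h : ch ∈ bMoves mu dgs c) :
    ch.length = c.length := by
  obtain ⟨dig, hdig, x, hget, -, hx, rfl⟩ := (mem_bMoves mu dgs c ch).1 h
  simp

lemma bMoves_cap_lt (mu dgs : Int) (c ch : List Int) (h : ch ∈ bMoves mu dgs c) :
    pvCap mu ch < pvCap mu c := by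
  have := bMoves_cap mu dgs c ch h; omega

-- the common pure specification: the value of a state, reading the given cache as an oracle
def gVal (max_digits max_use : Int) (cache0 : PySem.Dict (List Int) Int)
    (c : List Int) (d : Int) : Int :=
  if d = max_digits then 1
  else
    match cache0.get? c with
    | some v => v
    | none =>
      ((bMoves max_use d c).attach.map (fun p => gVal max_digits max_use cache0 p.1 (d + 1))).sum
termination_by pvCap max_use c
decreasing_by exact bMoves_cap_lt _ _ _ _ p.2

lemma gVal_eq (max_digits max_use : Int) (cache0 : PySem.Dict (List Int) Int)
    (c : List Int) (d : Int) :
    gVal max_digits max_use cache0 c d =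
      if d = max_digits then 1
      else
        match cache0.get? c with
        | some v => v
        | none =>
          ((bMoves max_use d c).map (fun s => gVal max_digits max_use cache0 s (d + 1))).sum := by
  rw [gVal]
  congr 1
  cases cache0.get? c with
  | some v => rfl
  | none => simp

lemma gVal_of_bTerm (max_digits max_use : Int) (cache0 : PySem.Dict (List Int) Int)
    (c : List Int) (d : Int) (t : Int) (h : bTerm max_digits cache0 c d = some t) :
    gVal max_digits max_use cache0 c d = t := by
  unfold bTerm at h
  rw [gVal_eq]
  by_cases hd : d = max_digits
  · rw [if_pos hd] at h ⊢; exact Option.some.inj h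
  · rw [if_neg hd] at h ⊢; rw [h]

lemma gVal_of_miss (max_digits max_use : Int) (cache0 : PySem.Dict (List Int) Int)
    (c : List Int) (d : Int) (h : bTerm max_digits cache0 c d = none) :
    gVal max_digits max_use cache0 c d =
      ((bMoves max_use d c).map (fun s => gVal max_digits max_use cache0 s (d + 1))).sum := by
  unfold bTerm at h
  by_cases hd : d = max_digits
  · rw [if_pos hd] at h; simp at h
  · rw [if_neg hd] at h
    rw [gVal_eq, if_neg hd, h]

-- ========== A-side: eliminating the threaded memo cache ==========

-- the threaded cache extends the input cache only by correctly-valued entries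
def Coh (max_digits max_use : Int) (cache0 : PySem.Dict (List Int) Int) (δ : Int)
    (ch : PySem.Dict (List Int) Int) : Prop :=
  ∀ k : List Int, ch.get? k = cache0.get? k ∨
    (cache0.get? k = none ∧
     ch.get? k = some (gVal max_digits max_use cache0 k (δ + k.sum)))

-- the moves A's for-loop still has to make from digit `dig` on
def tailMoves (mu : Int) (c : List Int) (dig : Nat) : List (List Int) :=
  (List.range' dig (10 - dig)).filterMap (fun (i : Nat) =>
    match PySem.List.pyGet? c (i : Int) with
    | some x => if x < mu then some (c.set i (x + 1)) else none
    | none => none)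

lemma tailMoves_step (mu : Int) (c : List Int) (dig : Nat) (hdig : dig < 10) (x : Int)
    (hget : PySem.List.pyGet? c (dig : Int) = some x) :
    tailMoves mu c dig =
      (if x < mu then [c.set dig (x + 1)] else []) ++ tailMoves mu c (dig + 1) := by
  unfold tailMoves
  have h10 : 10 - dig = (10 - (dig + 1)) + 1 := by omega
  rw [h10, List.range'_succ, List.filterMap_cons]
  by_cases hx : x < mu <;> simp [hget, hx]

lemma bMoves_decomp (mu d : Int) (c : List Int) (x0 : Int)
    (hget : PySem.List.pyGet? c (0 : Int) = some x0) :
    bMoves mu d c =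
      (if 0 < d ∧ x0 < mu then [c.set 0 (x0 + 1)] else []) ++ tailMoves mu c 1 := by
  unfold bMoves tailMoves
  have hr : List.range 10 = 0 :: List.range' 1 9 := by
    simp [List.range_eq_range', List.range'_succ]
  rw [hr, List.filterMap_cons]
  have hcast : ((0 : Nat) : Int) = (0 : Int) := rfl
  rw [hcast, hget]
  have hcongr : ∀ i ∈ List.range' 1 9,
      (fun (dig : Nat) =>
        match PySem.List.pyGet? c (dig : Int) with
        | some x => if (0 < dig ∨ 0 < d) ∧ x < mu then some (c.set dig (x + 1)) else none
        | none => none) i =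
      (fun (i : Nat) =>
        match PySem.List.pyGet? c (i : Int) with
        | some x => if x < mu then some (c.set i (x + 1)) else none
        | none => none) i := by
    intro i hi
    have hpos : 0 < i := by
      have := List.mem_range'_1.1 hi; omega
    cases hx : PySem.List.pyGet? c (i : Int) with
    | none => simp [hx]
    | some x => by_cases hxm : x < mu <;> simp [hx, hxm, hpos]
  rw [List.filterMap_congr hcongr]
  have h9 : (10 : Nat) - 1 = 9 := rfl
  rw [h9]
  by_cases hd : 0 < d
  · by_cases hxm : x0 < mu
    · simp [hd, hxm]
    · simp [hd, hxm]
  · simp [hd]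

lemma loop_spec (max_digits max_use : Int) (cache0 : PySem.Dict (List Int) Int) (δ : Int)
    (n : Nat)
    (IH : ∀ c d ch, pvCap max_use c < n → 10 ≤ c.length → d = δ + c.sum →
      Coh max_digits max_use cache0 δ ch →
      (searchGo max_digits max_use c d ch).1 = gVal max_digits max_use cache0 c d ∧
      Coh max_digits max_use cache0 δ (searchGo max_digits max_use c d ch).2) :
    ∀ m dig acc c d ch, 10 - dig = m → pvCap max_use c ≤ n → 10 ≤ c.length →
      d = δ + c.sum → Coh max_digits max_use cache0 δ ch →
      (searchLoop max_digits max_use c d dig acc ch).1 =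
        acc + ((tailMoves max_use c dig).map
          (fun s => gVal max_digits max_use cache0 s (d + 1))).sum ∧
      Coh max_digits max_use cache0 δ (searchLoop max_digits max_use c d dig acc ch).2 := by
  intro m
  induction m with
  | zero =>
    intro dig acc c d ch hm hcap hlen hd hcoh
    have hdig : ¬ dig < 10 := by omega
    have hnil : tailMoves max_use c dig = [] := by
      unfold tailMoves; rw [hm]; rfl
    rw [searchLoop, dif_neg hdig]
    exact ⟨by simp [hnil], hcoh⟩
  | succ k ihm =>
    intro dig acc c d ch hm hcap hlen hd hcoh
    have hdig : dig < 10 := by omega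
    have hlt : dig < c.length := by omega
    have hget := pyGet_of_lt c dig hlt
    rw [searchLoop, dif_pos hdig]
    split
    · rename_i x heq
      have hx : x = c.getD dig 0 := by rw [hget] at heq; exact (Option.some.inj heq).symm
      subst hx
      rw [tailMoves_step max_use c dig hdig _ hget]
      split_ifs with hxm
      · -- recursive call on the child, then the rest of the loop
        have hcapeq := pvCap_set_eq max_use c dig _ hdig hlt rfl hxm
        have hchlen : 10 ≤ (c.set dig (c.getD dig 0 + 1)).length := by
          rw [List.length_set]; exact hlen
        have hchsum : (c.set dig (c.getD dig 0 + 1)).sum = c.sum + 1 :=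
          sum_set_succ c dig _ hlt rfl
        obtain ⟨hr1, hrc⟩ := IH (c.set dig (c.getD dig 0 + 1)) (d + 1) ch
          (by omega) hchlen (by rw [hchsum]; omega) hcoh
        obtain ⟨hl1, hlc⟩ := ihm (dig + 1)
          (acc + (searchGo max_digits max_use (c.set dig (c.getD dig 0 + 1)) (d + 1) ch).1)
          c d (searchGo max_digits max_use (c.set dig (c.getD dig 0 + 1)) (d + 1) ch).2
          (by omega) hcap hlen hd hrc
        refine ⟨?_, hlc⟩
        rw [hl1, hr1]
        simp
        omega
      · obtain ⟨hl1, hlc⟩ := ihm (dig + 1) acc c d ch (by omega) hcap hlen hd hcoh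
        refine ⟨?_, hlc⟩
        rw [hl1]
        simp
    · rename_i heq
      rw [hget] at heq; simp at heq

lemma go_spec (max_digits max_use : Int) (cache0 : PySem.Dict (List Int) Int) (δ : Int) :
    ∀ n : Nat, ∀ c d ch, pvCap max_use c ≤ n → 10 ≤ c.length → d = δ + c.sum →
      Coh max_digits max_use cache0 δ ch →
      (searchGo max_digits max_use c d ch).1 = gVal max_digits max_use cache0 c d ∧
      Coh max_digits max_use cache0 δ (searchGo max_digits max_use c d ch).2 := by
  intro n
  induction n using Nat.strong_induction_on with
  | _ n IH =>
  intro c d ch hcap hlen hd hcoh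
  rw [searchGo]
  by_cases hbase : d = max_digits
  · rw [if_pos hbase]
    exact ⟨by rw [gVal_eq, if_pos hbase], hcoh⟩
  · rw [if_neg hbase]
    split
    · -- cache hit
      rename_i v hhit
      refine ⟨?_, hcoh⟩
      rcases hcoh c with hsame | ⟨hnone, hsome⟩
      · rw [hhit] at hsame
        exact (gVal_of_bTerm max_digits max_use cache0 c d v
          (by unfold bTerm; rw [if_neg hbase]; exact hsame.symm)).symm
      · rw [hhit] at hsome
        rw [← hd] at hsome
        exact Option.some.inj hsome
    · -- cache miss
      rename_i hhit
      have hmiss : cache0.get? c = none := by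
        rcases hcoh c with hsame | ⟨hnone, hsome⟩
        · rw [← hsame]; exact hhit
        · rw [hhit] at hsome; simp at hsome
      have hget0 : PySem.List.pyGet? c (0 : Int) = some (c.getD 0 0) := by
        simpa using pyGet_of_lt c 0 (by omega)
      -- the IH in the form loop_spec wants
      have IH' : ∀ c' d' ch', pvCap max_use c' < n → 10 ≤ c'.length → d' = δ + c'.sum →
          Coh max_digits max_use cache0 δ ch' →
          (searchGo max_digits max_use c' d' ch').1 = gVal max_digits max_use cache0 c' d' ∧
          Coh max_digits max_use cache0 δ (searchGo max_digits max_use c' d' ch').2 := by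
        intro c' d' ch' hlt hl hdd hc
        exact IH (pvCap max_use c') (by omega) c' d' ch' (le_refl _) hl hdd hc
      -- evaluate the digit-0 step
      have hstep0 : ∀ step0 : Int × PySem.Dict (List Int) Int,
          step0.1 = (if 0 < d ∧ c.getD 0 0 < max_use
            then gVal max_digits max_use cache0 (c.set 0 (c.getD 0 0 + 1)) (d + 1) else 0) →
          Coh max_digits max_use cache0 δ step0.2 →
          ((searchLoop max_digits max_use c d 1 step0.1 step0.2).1,
            (searchLoop max_digits max_use c d 1 step0.1 step0.2).2.insert c
              (searchLoop max_digits max_use c d 1 step0.1 step0.2).1).1 =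
            gVal max_digits max_use cache0 c d ∧
          Coh max_digits max_use cache0 δ
            ((searchLoop max_digits max_use c d 1 step0.1 step0.2).1,
              (searchLoop max_digits max_use c d 1 step0.1 step0.2).2.insert c
                (searchLoop max_digits max_use c d 1 step0.1 step0.2).1).2 := by
        intro step0 h1 h2
        obtain ⟨hl1, hlc⟩ := loop_spec max_digits max_use cache0 δ n IH' 9 1 step0.1 c d step0.2
          rfl hcap hlen hd h2
        have hval : (searchLoop max_digits max_use c d 1 step0.1 step0.2).1 =
            gVal max_digits max_use cache0 c d := by
          rw [hl1, h1]
          rw [gVal_of_miss max_digits max_use cache0 c d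
            (by unfold bTerm; rw [if_neg hbase]; exact hmiss)]
          rw [bMoves_decomp max_use d c _ hget0]
          rw [List.map_append, List.sum_append]
          by_cases hc0 : 0 < d ∧ c.getD 0 0 < max_use
          · rw [if_pos hc0, if_pos hc0]; simp
          · rw [if_neg hc0, if_neg hc0]; simp
        refine ⟨hval, ?_⟩
        intro k
        by_cases hk : k = c
        · subst hk
          right
          refine ⟨hmiss, ?_⟩
          rw [PySem.Dict.get?_insert_self, hval, hd]
        · rw [PySem.Dict.get?_insert_of_ne _ _ hk]
          exact hlc k
      -- dispatch on the actual digit-0 branch taken by the program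
      by_cases hdpos : 0 < d
      · rw [if_pos hdpos]
        split
        · rename_i x0 heq0
          have hx0 : x0 = c.getD 0 0 := by rw [hget0] at heq0; exact (Option.some.inj heq0).symm
          subst hx0
          split_ifs with hxm
          · have hcapeq := pvCap_set_eq max_use c 0 _ (by omega) (by omega) rfl hxm
            have hchlen : 10 ≤ (c.set 0 (c.getD 0 0 + 1)).length := by
              rw [List.length_set]; exact hlen
            have hchsum : (c.set 0 (c.getD 0 0 + 1)).sum = c.sum + 1 :=
              sum_set_succ c 0 _ (by omega) rfl
            obtain ⟨hr1, hrc⟩ := IH' (c.set 0 (c.getD 0 0 + 1)) (d + 1) ch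
              (by omega) hchlen (by rw [hchsum]; omega) hcoh
            exact hstep0 _ (by rw [hr1, if_pos ⟨hdpos, hxm⟩]) hrc
          · exact hstep0 (0, ch)
              (by show (0 : Int) = _; rw [if_neg (fun hc => hxm hc.2)]) hcoh
        · rename_i heq0
          rw [hget0] at heq0; simp at heq0
      · rw [if_neg hdpos]
        exact hstep0 (0, ch)
          (by show (0 : Int) = _; rw [if_neg (fun hc => hdpos hc.1)]) hcoh

-- ========== B-side: the level DP computes the same pure values ==========

lemma mem_bNext (max_digits max_use : Int) (cache0 : PySem.Dict (List Int) Int) (d : Int)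
    (f : List (List Int)) (ch : List Int) :
    ch ∈ bNext max_digits max_use cache0 d f ↔
      ∃ c ∈ f, ch ∈ bMoves max_use d c ∧ bTerm max_digits cache0 ch (d + 1) = none := by
  unfold bNext
  rw [PySem.List.mem_dedup, List.mem_flatMap]
  constructor
  · rintro ⟨c, hc, hch⟩
    rw [List.mem_filter] at hch
    exact ⟨c, hc, hch.1, by simpa [Option.isNone_iff_eq_none] using hch.2⟩
  · rintro ⟨c, hc, hm, ht⟩
    exact ⟨c, hc, List.mem_filter.2 ⟨hm, by simp [ht]⟩⟩

lemma bNext_nodup (max_digits max_use : Int) (cache0 : PySem.Dict (List Int) Int) (d : Int)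
    (f : List (List Int)) : (bNext max_digits max_use cache0 d f).Nodup := by
  exact PySem.List.nodup_dedup _

-- one level of the backward pass, generic preservation
lemma level_fold_pres (max_digits max_use : Int) (cache0 : PySem.Dict (List Int) Int)
    (d : Int) (l : List (List Int)) (vals : PySem.Dict (List Int) Int) (k : List Int)
    (hk : k ∉ l) :
    (l.foldl (fun v c => v.insert c (bChildVal max_digits max_use cache0 v d c)) vals).getD k 0 =
      vals.getD k 0 := by
  induction l generalizing vals with
  | nil => rfl
  | cons c l ih =>
    have hkc : ¬ k = c := fun e => hk (e ▸ List.mem_cons_self)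
    have hkl : k ∉ l := fun e => hk (List.mem_cons_of_mem _ e)
    rw [List.foldl_cons, ih _ hkl, PySem.Dict.getD_insert_of_ne _ _ _ hkc]

-- the value written for each state of a level only depends on the strictly deeper entries
lemma level_fold_spec (max_digits max_use : Int) (cache0 : PySem.Dict (List Int) Int)
    (d : Int) (fset : List (List Int)) (vals0 : PySem.Dict (List Int) Int) :
    ∀ (l : List (List Int)) (vals : PySem.Dict (List Int) Int),
      (∀ c ∈ l, c ∈ fset) → l.Nodup →
      (∀ k, k ∉ fset → vals.getD k 0 = vals0.getD k 0) →
      (∀ c ∈ fset, ∀ ch ∈ bMoves max_use d c, ch ∉ fset) →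
      (∀ k, k ∉ fset →
        (l.foldl (fun v c => v.insert c (bChildVal max_digits max_use cache0 v d c)) vals).getD k 0
          = vals0.getD k 0) ∧
      (∀ s ∈ l,
        (l.foldl (fun v c => v.insert c (bChildVal max_digits max_use cache0 v d c)) vals).getD s 0
          = bChildVal max_digits max_use cache0 vals0 d s) := by
  intro l
  induction l with
  | nil =>
    intro vals hsub hnd hagree hch
    exact ⟨fun k hk => hagree k hk, fun s hs => absurd hs (List.not_mem_nil)⟩
  | cons c l ih =>
    intro vals hsub hnd hagree hch
    have hcf : c ∈ fset := hsub c List.mem_cons_self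
    -- the value inserted for c only reads keys outside fset, where vals = vals0
    have hvc : bChildVal max_digits max_use cache0 vals d c =
        bChildVal max_digits max_use cache0 vals0 d c := by
      unfold bChildVal
      congr 1
      apply List.map_congr_left
      intro ch hchm
      cases ht : bTerm max_digits cache0 ch (d + 1) with
      | some t => rfl
      | none => exact hagree ch (hch c hcf ch hchm)
    have hagree' : ∀ k, k ∉ fset →
        (vals.insert c (bChildVal max_digits max_use cache0 vals d c)).getD k 0 =
          vals0.getD k 0 := by
      intro k hk
      have hkc : ¬ k = c := fun e => hk (e ▸ hcf)
      rw [PySem.Dict.getD_insert_of_ne _ _ _ hkc]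
      exact hagree k hk
    obtain ⟨ihA, ihB⟩ := ih (vals.insert c (bChildVal max_digits max_use cache0 vals d c))
      (fun x hx => hsub x (List.mem_cons_of_mem _ hx)) (List.Nodup.of_cons hnd) hagree' hch
    refine ⟨fun k hk => ihA k hk, ?_⟩
    intro s hs
    rw [List.foldl_cons]
    rcases List.mem_cons.1 hs with rfl | hs'
    · have hsl : s ∉ l := (List.nodup_cons.1 hnd).1
      rw [level_fold_pres max_digits max_use cache0 d l _ s hsl]
      rw [PySem.Dict.getD_insert_self, hvc]
    · exact ihB s hs' 

lemma levels_eval (max_digits max_use : Int) (cache0 : PySem.Dict (List Int) Int) :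
    ∀ (fuel : Nat) (d : Int) (f : List (List Int)) (m : Nat),
      (∀ s ∈ f, pvCap max_use s = m ∧ 10 ≤ s.length ∧ bTerm max_digits cache0 s d = none) →
      f.Nodup → m < fuel →
      ∀ s ∈ f,
        (bEval max_digits max_use cache0 (bLevels max_digits max_use cache0 fuel d f)).getD s 0 =
          gVal max_digits max_use cache0 s d := by
  intro fuel
  induction fuel with
  | zero => intro d f m hprops hnd hmf; omega
  | succ fuel ih =>
    intro d f m hprops hnd hmf s hs
    have hne : ¬ f.isEmpty = true := by
      cases f with
      | nil => exact absurd hs (List.not_mem_nil)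
      | cons a l => simp
    rw [bLevels, if_neg hne]
    have hbe : bEval max_digits max_use cache0
        ((d, f) :: bLevels max_digits max_use cache0 fuel (d + 1)
          (bNext max_digits max_use cache0 d f)) =
        f.foldl (fun v c => v.insert c (bChildVal max_digits max_use cache0 v d c))
          (bEval max_digits max_use cache0 (bLevels max_digits max_use cache0 fuel (d + 1)
            (bNext max_digits max_use cache0 d f))) := by
      unfold bEval
      rw [List.reverse_cons, List.foldl_append, List.foldl_cons, List.foldl_nil]
    rw [hbe]
    set vals0 := bEval max_digits max_use cache0
      (bLevels max_digits max_use cache0 fuel (d + 1) (bNext max_digits max_use cache0 d f))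
      with hv0
    have hch : ∀ c ∈ f, ∀ ch ∈ bMoves max_use d c, ch ∉ f := by
      intro c hc ch hchm hchf
      have h1 := bMoves_cap max_use d c ch hchm
      have h2 := (hprops c hc).1
      have h3 := (hprops ch hchf).1
      omega
    obtain ⟨-, hB⟩ := level_fold_spec max_digits max_use cache0 d f vals0 f vals0
      (fun x hx => hx) hnd (fun k _ => rfl) hch
    rw [hB s hs]
    rw [gVal_of_miss max_digits max_use cache0 s d (hprops s hs).2.2]
    unfold bChildVal
    congr 1
    apply List.map_congr_left
    intro ch hchm
    cases ht : bTerm max_digits cache0 ch (d + 1) with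
    | some t => exact (gVal_of_bTerm max_digits max_use cache0 ch (d + 1) t ht).symm
    | none =>
      have hcap := bMoves_cap max_use d s ch hchm
      have hm : pvCap max_use ch + 1 = m := by rw [hcap, (hprops s hs).1]
      have hmem' : ch ∈ bNext max_digits max_use cache0 d f :=
        (mem_bNext max_digits max_use cache0 d f ch).2 ⟨s, hs, hchm, ht⟩
      have hprops' : ∀ t ∈ bNext max_digits max_use cache0 d f,
          pvCap max_use t = m - 1 ∧ 10 ≤ t.length ∧
          bTerm max_digits cache0 t (d + 1) = none := by
        intro t htm
        obtain ⟨c, hc, hmv, htn⟩ := (mem_bNext max_digits max_use cache0 d f t).1 htm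
        have h1 := bMoves_cap max_use d c t hmv
        have h2 := (hprops c hc).1
        have h3 := bMoves_len max_use d c t hmv
        exact ⟨by omega, by rw [h3]; exact (hprops c hc).2.1, htn⟩
      show vals0.getD ch 0 = gVal max_digits max_use cache0 ch (d + 1)
      rw [hv0]
      exact (ih (d + 1) (bNext max_digits max_use cache0 d f) (m - 1) hprops'
        (bNext_nodup max_digits max_use cache0 d f) (by omega) ch hmem')

-- ===== VERDICT (by name: the statement is the Claim_ definition above) =====
theorem search_spec : Claim_equal_search := by
  intro counts digits max_digits max_use cache hdom hpre
  unfold Spec_search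
  by_cases hbase : digits = max_digits
  · have hAv : search counts digits max_digits max_use cache = 1 := by
      unfold search; rw [searchGo, if_pos hbase]
    have hBv : search_alt counts digits max_digits max_use cache = 1 := by
      unfold search_alt; rw [if_pos hbase]
    rw [hAv, hBv]
  · cases hhit : (PySem.Dict.mk cache).get? counts with
    | some v =>
      have hAv : search counts digits max_digits max_use cache = v := by
        unfold search; rw [searchGo, if_neg hbase, hhit]
      have hBv : search_alt counts digits max_digits max_use cache = v := by
        unfold search_alt; rw [if_neg hbase, hhit]
      rw [hAv, hBv]
    | none =>
      have hlen : 10 ≤ counts.length := by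
        unfold Pre_search at hpre
        rcases hpre with h | h | h
        · exact absurd h hbase
        · rw [hhit] at h; simp at h
        · exact h
      -- A-side: the memoized recursion computes the pure value
      have hA := (go_spec max_digits max_use (PySem.Dict.mk cache) (digits - counts.sum)
        (pvCap max_use counts) counts digits (PySem.Dict.mk cache) (le_refl _) hlen
        (by ring) (fun k => Or.inl rfl)).1
      -- B-side: the level DP computes the pure value
      have hB := levels_eval max_digits max_use (PySem.Dict.mk cache)
        (pvCap max_use counts + 1) digits [counts] (pvCap max_use counts)
        (by
          intro t ht
          rw [List.mem_singleton] at ht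
          subst ht
          exact ⟨rfl, hlen, by unfold bTerm; rw [if_neg hbase]; exact hhit⟩)
        (List.nodup_singleton _) (by omega) counts List.mem_cons_self
      have hBv : search_alt counts digits max_digits max_use cache =
          gVal max_digits max_use (PySem.Dict.mk cache) counts digits := by
        unfold search_alt
        rw [if_neg hbase, hhit]
        show (bEval max_digits max_use (PySem.Dict.mk cache)
          (bLevels max_digits max_use (PySem.Dict.mk cache) (pvCap max_use counts + 1)
            digits [counts])).getD counts 0 = _
        exact hB
      have hAv : search counts digits max_digits max_use cache =
          gVal max_digits max_use (PySem.Dict.mk cache) counts digits := by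
        unfold search
        exact hA
      rw [hAv, hBv]
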